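-- pv_equiv track=rewrite | github.com/981377660LMT/algorithm-study | 20_杂题/网易有道智云·AI 开放平台/分割环-哈希表加前缀和.py | check
-- ===== SOURCE A (Python) =====
-- from collections import defaultdict
-- from typing import List
--
-- def check(nums: List[int]) -> str:
--     sum_ = sum(nums)
--     if sum_ & 1:
--         return 'NO'
--     sum_ >>= 1
--
--     preSum = defaultdict(int)
--     preSum[0] = -1
--     curSum = 0
--     for i, num in enumerate(nums):
--         curSum += num
--         if curSum == sum_:
--             return 'YES'
--         if curSum - sum_ in preSum:
--             return 'YES'
--         preSum[curSum] = i
--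
--     return 'NO'
-- ===== SOURCE B (Python) =====
-- from typing import List
--
-- def check(nums: List[int]) -> str:
--     total = sum(nums)
--     if total % 2:
--         return 'NO'
--     target = total // 2
--     n = len(nums)
--     for i in range(n):
--         running = 0
--         for j in range(i, n):
--             running += nums[j]
--             if running == target:
--                 return 'YES'
--     return 'NO'
-- ===== Notes on version B (the rewrite author's own statement) =====
-- stated objective: simpler
-- what changed: Replaced the prefix-sum hash-set scan with a plain nested brute-force scan over all start indices, accumulating a running sum and returning YES on hitting total//2.
import Mathlib
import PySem

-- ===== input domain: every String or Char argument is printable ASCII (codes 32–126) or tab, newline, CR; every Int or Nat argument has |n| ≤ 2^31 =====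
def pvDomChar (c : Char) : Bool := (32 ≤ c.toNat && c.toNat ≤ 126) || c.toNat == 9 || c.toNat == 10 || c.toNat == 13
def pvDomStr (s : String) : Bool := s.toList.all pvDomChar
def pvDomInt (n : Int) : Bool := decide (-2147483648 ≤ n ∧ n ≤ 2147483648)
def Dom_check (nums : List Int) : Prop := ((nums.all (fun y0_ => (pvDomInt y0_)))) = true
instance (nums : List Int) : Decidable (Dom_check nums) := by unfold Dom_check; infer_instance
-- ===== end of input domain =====

-- B replaces A's prefix-sum hash set with a plain nested brute-force scan (objective: simpler).

-- ===== PORT A =====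
-- the for-loop with early 'return' becomes structural recursion over the list, same state (preSum, curSum, i)
def checkLoop (target : Int) (pre : PySem.Dict Int Int) (cur : Int) (i : Int) : List Int → String
  | [] => "NO"
  | num :: rest =>
    let cur' := cur + num
    if cur' = target then "YES"
    else if pre.contains (cur' - target) then "YES"
    else checkLoop target (pre.insert cur' i) cur' (i + 1) rest

def check (nums : List Int) : String :=
  let s := nums.sum
  -- 'sum_ & 1' is truthy iff sum_ is odd: for Python ints, s & 1 = s mod 2 (exact)
  if PySem.Int.mod s 2 ≠ 0 then "NO"
  else
    -- 'sum_ >>= 1' is an arithmetic right shift = floor division by 2 (exact)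
    checkLoop (PySem.Int.floordiv s 2) ((PySem.Dict.empty).insert 0 (-1)) 0 0 nums

-- ===== PORT B =====
-- inner 'for j in range(i, n)' over the suffix, accumulating running
def innerScan (target run : Int) : List Int → Bool
  | [] => false
  | x :: rest => if run + x = target then true else innerScan target (run + x) rest

-- outer 'for i in range(n)': one inner scan per start position (suffix)
def outerScan (target : Int) : List Int → Bool
  | [] => false
  | x :: rest => if innerScan target 0 (x :: rest) then true else outerScan target rest

def check_alt (nums : List Int) : String :=
  let total := nums.sum
  if PySem.Int.mod total 2 ≠ 0 then "NO"
  else if outerScan (PySem.Int.floordiv total 2) nums then "YES" else "NO"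

-- ===== PRECONDITION & SPEC =====
def Spec_check (nums : List Int) (out : String) : Prop := out = check_alt nums
instance (nums : List Int) (out : String) : Decidable (Spec_check nums out) := by unfold Spec_check; infer_instance

-- ===== CLAIM (what is proved, stated in full; the proofs are below) =====
def Claim_equal_check : Prop := ∀ (nums : List Int), Dom_check nums → Spec_check nums (check nums)

-- ===== LEMMAS AND PROOFS =====

-- "some nonempty contiguous subarray of l sums to target"
def HasSub (target : Int) (l : List Int) : Prop :=
  ∃ u v w, l = u ++ v ++ w ∧ v ≠ [] ∧ v.sum = target

lemma innerScan_char (target : Int) (l : List Int) : ∀ run,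
    innerScan target run l = true ↔ ∃ v w, l = v ++ w ∧ v ≠ [] ∧ run + v.sum = target := by
  induction l with
  | nil =>
    intro run
    simp only [innerScan]
    constructor
    · intro h; cases h
    · rintro ⟨v, w, hvw, hv, -⟩
      exact absurd (List.append_eq_nil_iff.mp hvw.symm).1 hv
  | cons x rest ih =>
    intro run
    simp only [innerScan]
    split
    · rename_i hx
      constructor
      · intro _; exact ⟨[x], rest, rfl, by simp, by simpa using hx⟩
      · intro _; rfl
    · rename_i hx
      rw [ih (run + x)]
      constructor
      · rintro ⟨v, w, hvw, hv, hsum⟩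
        exact ⟨x :: v, w, by simp [hvw], by simp, by simp [List.sum_cons]; omega⟩
      · rintro ⟨v, w, hvw, hv, hsum⟩
        rcases v with _ | ⟨y, v'⟩
        · exact absurd rfl hv
        · obtain ⟨rfl, hrest⟩ : x = y ∧ rest = v' ++ w := by
            simpa using hvw
          rcases v' with _ | ⟨z, v''⟩
          · simp at hsum; omega
          · exact ⟨z :: v'', w, hrest, by simp, by simp [List.sum_cons] at hsum ⊢; omega⟩

lemma outerScan_char (target : Int) (l : List Int) :
    outerScan target l = true ↔ HasSub target l := by
  induction l with
  | nil =>
    simp only [outerScan, HasSub]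
    constructor
    · intro h; cases h
    · rintro ⟨u, v, w, huvw, hv, -⟩
      have h0 := huvw.symm
      simp only [List.append_eq_nil_iff] at h0
      exact absurd h0.1.2 hv
  | cons x rest ih =>
    simp only [outerScan]
    split
    · rename_i hin
      rw [innerScan_char] at hin
      obtain ⟨v, w, hvw, hv, hs⟩ := hin
      constructor
      · intro _; exact ⟨[], v, w, by simpa using hvw, hv, by omega⟩
      · intro _; rfl
    · rename_i hin
      rw [ih]
      constructor
      · intro h
        obtain ⟨u, v, w, huvw, hv, hs⟩ := h
        exact ⟨x :: u, v, w, by simp [huvw], hv, hs⟩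
      · rintro ⟨u, v, w, huvw, hv, hs⟩
        rcases u with _ | ⟨y, u'⟩
        · exfalso
          apply hin
          rw [innerScan_char]
          exact ⟨v, w, by simpa using huvw, hv, by omega⟩
        · obtain ⟨rfl, hrest⟩ : x = y ∧ rest = u' ++ (v ++ w) := by simpa using huvw
          exact ⟨u', v, w, by simpa [List.append_assoc] using hrest, hv, hs⟩

lemma checkLoop_yes_or_no (target : Int) :
    ∀ (l : List Int) (pre : PySem.Dict Int Int) (cur i : Int),
      checkLoop target pre cur i l = "YES" ∨ checkLoop target pre cur i l = "NO" := by
  intro l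
  induction l with
  | nil => intro pre cur i; right; rfl
  | cons num rest ih =>
    intro pre cur i
    simp only [checkLoop]
    split
    · left; rfl
    · split
      · left; rfl
      · exact ih _ _ _

-- characterisation of A's loop: with pre holding exactly the prefix sums of 'done',
-- it answers YES iff some subarray ending strictly inside 'rest' sums to target
lemma checkLoop_char (target : Int) :
    ∀ (rest done : List Int) (pre : PySem.Dict Int Int) (i : Int),
      (∀ k, pre.contains k = true ↔ ∃ t, t <+: done ∧ t.sum = k) →
      (checkLoop target pre done.sum i rest = "YES" ↔
        ∃ p q, rest = p ++ q ∧ p ≠ [] ∧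
          ∃ t, t <+: done ++ p.dropLast ∧ t.sum = done.sum + p.sum - target) := by
  intro rest
  induction rest with
  | nil =>
    intro done pre i hpre
    simp only [checkLoop]
    constructor
    · intro h; exact absurd h (by decide)
    · rintro ⟨p, q, hpq, hp, -⟩
      exact absurd (List.append_eq_nil_iff.mp hpq.symm).1 hp
  | cons num rest' ih =>
    intro done pre i hpre
    simp only [checkLoop]
    split
    · rename_i hx
      constructor
      · intro _
        exact ⟨[num], rest', rfl, by simp, [], by simp, by simp; omega⟩
      · intro _; rfl
    · split
      · rename_i hx hc
        rw [hpre] at hc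
        obtain ⟨t, ht, hts⟩ := hc
        constructor
        · intro _
          exact ⟨[num], rest', rfl, by simp,
            t, by simpa using ht, by simp; omega⟩
        · intro _; rfl
      · rename_i hx hc
        rw [hpre] at hc
        -- no prefix of done has sum (done.sum + num) - target
        have hno : ¬ ∃ t, t <+: done ∧ t.sum = done.sum + num - target := hc
        have hsum' : (done ++ [num]).sum = done.sum + num := by simp
        have hpre' : ∀ k, (pre.insert (done.sum + num) i).contains k = true ↔
            ∃ t, t <+: done ++ [num] ∧ t.sum = k := by
          intro k
          rw [PySem.Dict.contains_insert]
          simp only [Bool.or_eq_true, beq_iff_eq]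
          rw [hpre]
          constructor
          · rintro (rfl | ⟨t, ht, hts⟩)
            · exact ⟨done ++ [num], List.prefix_refl _, hsum'⟩
            · exact ⟨t, ht.trans (List.prefix_append _ _), hts⟩
          · rintro ⟨t, ht, hts⟩
            rcases List.prefix_concat_iff.mp ht with rfl | ht'
            · left; omega
            · right; exact ⟨t, ht', hts⟩
        have := ih (done ++ [num]) (pre.insert (done.sum + num) i) (i + 1) hpre'
        rw [hsum'] at this
        rw [this]
        constructor
        · rintro ⟨p', q', hpq, hp', t, ht, hts⟩
          refine ⟨num :: p', q', by simp [hpq], by simp, t, ?_, ?_⟩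
          · rcases p' with _ | ⟨z, p''⟩
            · exact absurd rfl hp'
            · simpa [List.dropLast_cons₂, List.append_assoc] using ht
          · simp at hts ⊢; omega
        · rintro ⟨p, q, hpq, hp, t, ht, hts⟩
          rcases p with _ | ⟨y, p'⟩
          · exact absurd rfl hp
          · obtain ⟨rfl, hrest⟩ : num = y ∧ rest' = p' ++ q := by simpa using hpq
            rcases p' with _ | ⟨z, p''⟩
            · exfalso
              apply hno
              refine ⟨t, by simpa using ht, by simp at hts; omega⟩
            · refine ⟨z :: p'', q, hrest, by simp, t, ?_, ?_⟩
              · simpa [List.dropLast_cons₂, List.append_assoc] using ht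
              · simp at hts ⊢; omega

-- bridge: the loop characterisation at done = [] is exactly HasSub
lemma hasSub_iff (target : Int) (l : List Int) :
    (∃ p q, l = p ++ q ∧ p ≠ [] ∧
        ∃ t, t <+: p.dropLast ∧ t.sum = p.sum - target) ↔ HasSub target l := by
  constructor
  · rintro ⟨p, q, rfl, hp, t, ht, hts⟩
    have htp : t <+: p := ht.trans (List.dropLast_prefix p)
    obtain ⟨r, hr⟩ := htp
    have hplen : 0 < p.length := List.length_pos_iff.mpr hp
    have htlen : t.length ≤ p.length - 1 := by
      have := ht.length_le
      rwa [List.length_dropLast] at this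
    have hrne : r ≠ [] := by
      intro h
      subst h
      have : t.length = p.length := by rw [← hr]; simp
      omega
    refine ⟨t, r, q, by rw [← hr], hrne, ?_⟩
    have : t.sum + r.sum = p.sum := by rw [← hr]; simp
    omega
  · rintro ⟨u, v, w, rfl, hv, hvs⟩
    refine ⟨u ++ v, w, by simp, by simp [hv], u, ?_, by simp [hvs]⟩
    rw [List.dropLast_append_of_ne_nil hv]
    exact List.prefix_append _ _

lemma contains_init (k : Int) :
    ((PySem.Dict.empty : PySem.Dict Int Int).insert 0 (-1)).contains k = true ↔
      ∃ t, t <+: ([] : List Int) ∧ t.sum = k := by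
  rw [PySem.Dict.contains_insert]
  simp only [Bool.or_eq_true, beq_iff_eq, PySem.Dict.contains_empty]
  constructor
  · rintro (rfl | h)
    · exact ⟨[], List.prefix_refl _, rfl⟩
    · cases h
  · rintro ⟨t, ht, hts⟩
    left
    rw [List.prefix_nil.mp ht] at hts
    exact hts.symm

-- ===== VERDICT (by name: the statement is the Claim_ definition above) =====
theorem check_spec : Claim_equal_check := by
  intro nums _
  unfold Spec_check check check_alt
  by_cases hpar : PySem.Int.mod nums.sum 2 ≠ 0
  · rw [if_pos hpar, if_pos hpar]
  · rw [if_neg hpar, if_neg hpar]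
    set target := PySem.Int.floordiv nums.sum 2 with htgt
    have hA : checkLoop target ((PySem.Dict.empty).insert 0 (-1)) 0 0 nums = "YES" ↔
        HasSub target nums := by
      have := checkLoop_char target nums [] ((PySem.Dict.empty).insert 0 (-1)) 0
        (fun k => contains_init k)
      simp only [List.sum_nil, List.nil_append] at this
      rw [this]
      simpa using hasSub_iff target nums
    have hB : outerScan target nums = true ↔ HasSub target nums := outerScan_char target nums
    rcases h : outerScan target nums with _ | _
    · have : ¬ HasSub target nums := by rw [← hB]; simp [h]
      rcases checkLoop_yes_or_no target nums ((PySem.Dict.empty).insert 0 (-1)) 0 0 with hy | hn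
      · exact absurd (hA.mp hy) this
      · simp [hn]
    · simp [hA.mpr (hB.mp h)]
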